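-- pv_equiv track=rewrite | github.com/vvvDuB/brute-force | caesar_breaker.py | word_match
-- ===== SOURCE A (Python) =====
-- def word_match(text: str) -> int:
--     COMMON_ENGLISH = ["the", "and", "of", "to", "a", "in", "is", "it", "you", "that"]
--
--     words = text.split(" ")
--     counter = 0
--     for w in words:
--         if w in COMMON_ENGLISH:
--             counter += 1
--
--     return counter
-- ===== SOURCE B (Python) =====
-- def word_match(text: str) -> int:
--     common = "the and of to a in is it you that".split(" ")
--     words = text.split(" ")
--     return sum(words.count(w) for w in common)
-- ===== Notes on version B (the rewrite author's own statement) =====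
-- stated objective: alternative
-- what changed: Inverts the control flow: instead of scanning words with a per-word membership branch, B iterates over the ten fixed common words (derived by splitting one constant string) and sums list.count occurrences of each in the word list.
import Mathlib
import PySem

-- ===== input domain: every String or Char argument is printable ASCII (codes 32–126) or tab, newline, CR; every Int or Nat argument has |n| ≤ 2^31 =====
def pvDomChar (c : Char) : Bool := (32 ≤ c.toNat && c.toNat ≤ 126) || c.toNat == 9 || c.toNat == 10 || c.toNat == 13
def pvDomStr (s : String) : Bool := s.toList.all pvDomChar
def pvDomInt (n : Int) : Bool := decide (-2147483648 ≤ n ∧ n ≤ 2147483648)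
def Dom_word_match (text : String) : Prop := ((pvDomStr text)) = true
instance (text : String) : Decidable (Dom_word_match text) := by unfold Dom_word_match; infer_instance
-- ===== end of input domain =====

-- B inverts the control flow: it iterates over the ten fixed common words and sums
-- each word's occurrence count in the word list, instead of A's per-word membership branch.

-- ===== PORT A =====
def word_match (text : String) : Int :=
  let COMMON_ENGLISH : List String := ["the", "and", "of", "to", "a", "in", "is", "it", "you", "that"]
  let words := (PySem.Str.split? text " ").getD []
  words.foldl (fun counter w => if w ∈ COMMON_ENGLISH then counter + 1 else counter) 0

-- ===== PORT B =====
def word_match_alt (text : String) : Int :=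
  let common := (PySem.Str.split? "the and of to a in is it you that" " ").getD []
  let words := (PySem.Str.split? text " ").getD []
  (common.map (fun w => (words.count w : Int))).sum

-- ===== PRECONDITION & SPEC =====
def Spec_word_match (text : String) (out : Int) : Prop := out = word_match_alt text
instance (text : String) (out : Int) : Decidable (Spec_word_match text out) := by unfold Spec_word_match; infer_instance

-- ===== CLAIM =====
def Claim_equal_word_match : Prop := ∀ (text : String), Dom_word_match text → Spec_word_match text (word_match text)

-- ===== LEMMAS AND PROOFS =====

lemma indicator_zero_of_not_mem (x : String) (cs : List String) (hx : x ∉ cs) :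
    (cs.map (fun w => if x = w then (1 : Int) else 0)).sum = 0 := by
  induction cs with
  | nil => simp
  | cons c cs ih =>
    simp only [List.mem_cons, not_or] at hx
    simp [hx.1, ih hx.2]

lemma indicator_sum (x : String) (cs : List String) (h : cs.Nodup) :
    (cs.map (fun w => if x = w then (1 : Int) else 0)).sum
      = if x ∈ cs then 1 else 0 := by
  induction cs with
  | nil => simp
  | cons c cs ih =>
    simp only [List.nodup_cons] at h
    by_cases hx : x = c
    · subst hx
      simp [List.map_cons, List.sum_cons, indicator_zero_of_not_mem x cs h.1]
    · simp [List.map_cons, List.sum_cons, hx, ih h.2, List.mem_cons]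

lemma countP_eq_sum_counts (cs : List String) (h : cs.Nodup) (l : List String) :
    (l.countP (fun w => decide (w ∈ cs)) : Int)
      = (cs.map (fun w => (l.count w : Int))).sum := by
  induction l with
  | nil => simp
  | cons x l ih =>
    have hcount : ∀ w : String, ((x :: l).count w : Int)
        = (l.count w : Int) + (if w = x then 1 else 0) := by
      intro w
      by_cases hw : w = x
      · simp [hw]
      · simp [List.count_cons, hw]
        exact fun h => hw h.symm
    have hx : ∀ w : String, (if w = x then (1:Int) else 0) = (if x = w then 1 else 0) := by
      intro w; by_cases hw : w = x
      · simp [hw]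
      · rw [if_neg hw, if_neg (fun h => hw h.symm)]
    calc ((x :: l).countP (fun w => decide (w ∈ cs)) : Int)
        = (l.countP (fun w => decide (w ∈ cs)) : Int) + (if x ∈ cs then 1 else 0) := by
          by_cases hm : x ∈ cs <;> simp [hm]
      _ = (cs.map (fun w => (l.count w : Int))).sum
            + (cs.map (fun w => if x = w then (1:Int) else 0)).sum := by
          rw [ih, indicator_sum x cs h]
      _ = (cs.map (fun w => (l.count w : Int) + (if x = w then 1 else 0))).sum := by
          exact (PySem.List.sum_map_add_int _ _ _).symm
      _ = (cs.map (fun w => ((x :: l).count w : Int))).sum := by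
          apply congrArg
          apply List.map_congr_left
          intro w _
          rw [hcount w, hx w]

lemma common_split :
    (PySem.Str.split? "the and of to a in is it you that" " ").getD []
      = ["the", "and", "of", "to", "a", "in", "is", "it", "you", "that"] := by
  decide

-- ===== VERDICT =====
theorem word_match_spec : Claim_equal_word_match := by
  intro text _
  unfold Spec_word_match word_match word_match_alt
  rw [common_split]
  simp only [PySem.List.foldl_ite_add_one]
  simpa using countP_eq_sum_counts ["the", "and", "of", "to", "a", "in", "is", "it", "you", "that"] (by decide) _
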